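-- pv_equiv track=rewrite | github.com/wol101/GaitSym2019 | scripts/apply_genome.py | find_unmatched_close_bracket
-- ===== SOURCE A (Python) =====
-- def find_unmatched_close_bracket(input_string):
--     num_brackets = 0
--     for i in range(0, len(input_string)):
--         if input_string[i] == '(':
--             num_brackets = num_brackets + 1
--         if input_string[i] == ')':
--             num_brackets = num_brackets - 1
--         if num_brackets < 0:
--             return i
--     return -1
-- ===== SOURCE B (Python) =====
-- def find_unmatched_close_bracket(input_string):
--     # Divide and conquer: a segment [lo, hi) is summarised by the pair
--     # (index of the first unmatched ')' given the incoming balance, or -1;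
--     #  the balance after the whole segment). Halves are combined by
--     # sequencing their summaries.
--     def scan(lo, hi, bal):
--         if lo >= hi:
--             return -1, bal
--         if hi - lo == 1:
--             c = input_string[lo]
--             if c == '(':
--                 return -1, bal + 1
--             if c == ')':
--                 if bal <= 0:
--                     return lo, bal - 1
--                 return -1, bal - 1
--             return -1, bal
--         mid = (lo + hi) // 2
--         idx, bal = scan(lo, mid, bal)
--         if idx != -1:
--             return idx, bal
--         return scan(mid, hi, bal)
--     return scan(0, len(input_string), 0)[0]
-- ===== Notes on version B (the rewrite author's own statement) =====
-- stated objective: alternative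
-- what changed: A is one fused left-to-right loop with a counter and early return; B is a divide-and-conquer recursion that summarises each half of the string as a (first-unmatched-index or -1, end-balance) pair and combines the halves by sequencing these summaries.
import Mathlib
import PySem

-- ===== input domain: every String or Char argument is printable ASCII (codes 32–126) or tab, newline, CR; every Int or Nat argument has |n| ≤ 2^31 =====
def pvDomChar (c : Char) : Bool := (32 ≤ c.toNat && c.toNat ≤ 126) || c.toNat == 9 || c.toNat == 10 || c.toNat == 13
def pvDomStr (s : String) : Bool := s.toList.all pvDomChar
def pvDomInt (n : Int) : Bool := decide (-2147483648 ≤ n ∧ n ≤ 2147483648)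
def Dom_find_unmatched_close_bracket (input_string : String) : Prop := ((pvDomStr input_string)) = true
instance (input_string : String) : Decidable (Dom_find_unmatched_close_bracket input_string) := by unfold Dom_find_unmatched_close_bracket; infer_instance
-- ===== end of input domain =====

-- B replaces A's fused left-to-right counting loop by a divide-and-conquer recursion that
-- summarises each half of the string as a (first-unmatched-index, end-balance) pair (objective: alternative).

-- ===== PORT A =====
-- A's fused loop: index counter i, running bracket count, early return when it drops below 0.
def pvGoA : List Char → Int → Int → Int
  | [], _, _ => -1
  | c :: rest, i, num =>
    let num1 := if c = '(' then num + 1 else num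
    let num2 := if c = ')' then num1 - 1 else num1
    if num2 < 0 then i else pvGoA rest (i + 1) num2

def find_unmatched_close_bracket (input_string : String) : Int :=
  pvGoA input_string.toList 0 0

-- ===== PORT B =====
-- B's segment recursion: the list argument is the character window input_string[lo:hi],
-- lo its absolute start index; returns (first unmatched ')' index or -1, balance after segment).
lemma pvScan_dec_take (c1 c2 : Char) (rest : List Char) :
    ((c1 :: c2 :: rest).take ((c1 :: c2 :: rest).length / 2)).length < (c1 :: c2 :: rest).length := by
  simp [List.length_take]; omega

lemma pvScan_dec_drop (c1 c2 : Char) (rest : List Char) :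
    ((c1 :: c2 :: rest).drop ((c1 :: c2 :: rest).length / 2)).length < (c1 :: c2 :: rest).length := by
  simp; omega

def pvScan : List Char → Int → Int → Int × Int
  | [], _, bal => (-1, bal)
  | [c], lo, bal =>
    if c = '(' then (-1, bal + 1)
    else if c = ')' then (if bal ≤ 0 then (lo, bal - 1) else (-1, bal - 1))
    else (-1, bal)
  | c1 :: c2 :: rest, lo, bal =>
    let cs := c1 :: c2 :: rest
    let m := cs.length / 2
    let p := pvScan (cs.take m) lo bal
    if p.1 ≠ -1 then p else pvScan (cs.drop m) (lo + (m : Int)) p.2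
termination_by cs _ _ => cs.length
decreasing_by
  · exact pvScan_dec_take c1 c2 rest
  · exact pvScan_dec_drop c1 c2 rest

def find_unmatched_close_bracket_alt (input_string : String) : Int :=
  (pvScan input_string.toList 0 0).1

-- ===== PRECONDITION & SPEC =====
def Spec_find_unmatched_close_bracket (input_string : String) (out : Int) : Prop := out = find_unmatched_close_bracket_alt input_string
instance (input_string : String) (out : Int) : Decidable (Spec_find_unmatched_close_bracket input_string out) := by unfold Spec_find_unmatched_close_bracket; infer_instance

-- ===== CLAIM (what is proved, stated in full; the proofs are below) =====
def Claim_equal_find_unmatched_close_bracket : Prop := ∀ (input_string : String), Dom_find_unmatched_close_bracket input_string → Spec_find_unmatched_close_bracket input_string (find_unmatched_close_bracket input_string)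

-- ===== LEMMAS AND PROOFS =====
-- Linear reference semantics: A's fused loop, but also returning the final balance.
def pvLin : List Char → Int → Int → Int × Int
  | [], _, b => (-1, b)
  | c :: rest, i, b =>
    let b1 := if c = '(' then b + 1 else b
    let b2 := if c = ')' then b1 - 1 else b1
    if b2 < 0 then (i, b2) else pvLin rest (i + 1) b2

lemma pvGoA_eq_lin : ∀ (cs : List Char) (i b : Int), pvGoA cs i b = (pvLin cs i b).1 := by
  intro cs
  induction cs with
  | nil => intro i b; simp [pvGoA, pvLin]
  | cons c rest ih =>
    intro i b
    simp only [pvGoA, pvLin]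
    by_cases h : (if c = ')' then (if c = '(' then b + 1 else b) - 1
                  else (if c = '(' then b + 1 else b)) < 0
    · simp only [if_pos h]
    · simp only [if_neg h]
      exact ih _ _

lemma pvLin_snd_nonneg : ∀ (cs : List Char) (i b : Int), 0 ≤ i → 0 ≤ b →
    (pvLin cs i b).1 = -1 → 0 ≤ (pvLin cs i b).2 := by
  intro cs
  induction cs with
  | nil => intro i b _ hb _; simpa [pvLin]
  | cons c rest ih =>
    intro i b hi hb h
    simp only [pvLin] at h ⊢
    by_cases hlt : (if c = ')' then (if c = '(' then b + 1 else b) - 1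
                    else (if c = '(' then b + 1 else b)) < 0
    · simp only [if_pos hlt] at h; omega
    · simp only [if_neg hlt] at h ⊢
      exact ih _ _ (by omega) (by omega) h

lemma pvLin_append : ∀ (xs ys : List Char) (i b : Int), 0 ≤ i →
    pvLin (xs ++ ys) i b =
      if (pvLin xs i b).1 ≠ -1 then pvLin xs i b
      else pvLin ys (i + (xs.length : Int)) (pvLin xs i b).2 := by
  intro xs
  induction xs with
  | nil => intro ys i b _; simp [pvLin]
  | cons c rest ih =>
    intro ys i b hi
    simp only [List.cons_append, pvLin]
    by_cases hlt : (if c = ')' then (if c = '(' then b + 1 else b) - 1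
                    else (if c = '(' then b + 1 else b)) < 0
    · have hne : ¬ (i = -1) := by omega
      simp only [if_pos hlt]
      simp [hne]
    · simp only [if_neg hlt]
      rw [ih ys (i + 1) _ (by omega)]
      have hlen : (i + 1) + (rest.length : Int) = i + (((c :: rest).length : Nat) : Int) := by
        simp only [List.length_cons]
        push_cast
        ring
      rw [hlen]

lemma pvScan_eq_lin : ∀ (n : Nat) (cs : List Char), cs.length ≤ n → ∀ (lo b : Int),
    0 ≤ lo → 0 ≤ b → pvScan cs lo b = pvLin cs lo b := by
  intro n
  induction n with
  | zero =>
    intro cs h lo b _ _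
    have : cs = [] := List.eq_nil_of_length_eq_zero (Nat.le_zero.mp h)
    subst this
    simp [pvScan, pvLin]
  | succ n ih =>
    intro cs h lo b hlo hb
    match cs with
    | [] => simp [pvScan, pvLin]
    | [c] =>
      by_cases h1 : c = '('
      · subst h1
        have hnb : ¬ ((b + 1 : Int) < 0) := by omega
        simp [pvScan, pvLin, hnb]
      · by_cases h2 : c = ')'
        · subst h2
          by_cases h3 : b ≤ 0
          · have hlt : (b - 1 : Int) < 0 := by omega
            simp [pvScan, pvLin, h3, hlt]
          · have hlt : ¬ ((b - 1 : Int) < 0) := by omega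
            simp [pvScan, pvLin, h3, hlt]
        · have hlt : ¬ ((b : Int) < 0) := by omega
          simp [pvScan, pvLin, h1, h2, hlt]
    | c1 :: c2 :: rest =>
      have hlen : (c1 :: c2 :: rest).length = rest.length + 2 := by simp
      have hsp := List.take_append_drop ((c1 :: c2 :: rest).length / 2) (c1 :: c2 :: rest)
      have htk : ((c1 :: c2 :: rest).take ((c1 :: c2 :: rest).length / 2)).length
                   = (c1 :: c2 :: rest).length / 2 := by
        simp [List.length_take]; omega
      have h1 : ((c1 :: c2 :: rest).take ((c1 :: c2 :: rest).length / 2)).length ≤ n := by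
        rw [htk]; omega
      have h2 : ((c1 :: c2 :: rest).drop ((c1 :: c2 :: rest).length / 2)).length ≤ n := by
        simp only [List.length_drop]; omega
      simp only [pvScan]
      rw [ih _ h1 _ _ hlo hb]
      by_cases hne : (pvLin ((c1 :: c2 :: rest).take ((c1 :: c2 :: rest).length / 2)) lo b).1 ≠ -1
      · simp only [if_pos hne]
        conv_rhs => rw [← hsp]
        rw [pvLin_append _ _ _ _ hlo, if_pos hne]
      · simp only [if_neg hne]
        push Not at hne
        have hb' := pvLin_snd_nonneg _ _ _ hlo hb hne
        rw [ih _ h2 _ _ (by positivity) hb']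
        conv_rhs => rw [← hsp]
        rw [pvLin_append _ _ _ _ hlo]
        simp only [hne, ne_eq, not_true_eq_false, if_false]
        rw [htk]

-- ===== VERDICT (by name: the statement is the Claim_ definition above) =====
theorem find_unmatched_close_bracket_spec : Claim_equal_find_unmatched_close_bracket := by
  intro s _
  unfold Spec_find_unmatched_close_bracket find_unmatched_close_bracket find_unmatched_close_bracket_alt
  rw [pvScan_eq_lin s.toList.length _ le_rfl _ _ le_rfl le_rfl, pvGoA_eq_lin]
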